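-- pv_equiv track=rewrite | github.com/DMontgomery40/football-tactical-workbench | backend/app/training.py | _matching_class_ids
-- ===== SOURCE A (Python) =====
-- from typing import Any
--
-- def _normalize_class_name(value: Any) -> str:
--     return " ".join(str(value or "").strip().lower().replace("_", " ").replace("-", " ").split())
--
-- def _matching_class_ids(names: list[str], hints: tuple[str, ...]) -> list[int]:
--     hint_set = {_normalize_class_name(hint) for hint in hints}
--     matched_ids: list[int] = []
--     for class_id, label in enumerate(names):
--         normalized = _normalize_class_name(label)
--         if not normalized:
--             continue
--         tokens = set(normalized.split())
--         if normalized in hint_set or tokens.intersection(hint_set):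
--             matched_ids.append(class_id)
--     return sorted(set(matched_ids))
-- ===== SOURCE B (Python) =====
-- def _normalize_class_name(value) -> str:
--     return " ".join(str(value or "").strip().lower().replace("_", " ").replace("-", " ").split())
--
-- def _matching_class_ids(names: list[str], hints: tuple[str, ...]) -> list[int]:
--     hint_set = {_normalize_class_name(hint) for hint in hints}
--     # Inverted index: normalized full label and each token -> class ids carrying it.
--     index: dict[str, list[int]] = {}
--     for class_id, label in enumerate(names):
--         normalized = _normalize_class_name(label)
--         if not normalized:
--             continue
--         for key in [normalized, *normalized.split()]:
--             index.setdefault(key, []).append(class_id)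
--     collected: set[int] = set()
--     for hint in hint_set:
--         collected.update(index.get(hint, []))
--     return sorted(collected)
-- ===== Notes on version B (the rewrite author's own statement) =====
-- stated objective: alternative
-- what changed: B inverts the traversal: one pass over names builds an inverted index from normalized label and tokens to class ids, then the normalized hints are looked up in the index, instead of testing every label against the hint set.
import Mathlib
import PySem

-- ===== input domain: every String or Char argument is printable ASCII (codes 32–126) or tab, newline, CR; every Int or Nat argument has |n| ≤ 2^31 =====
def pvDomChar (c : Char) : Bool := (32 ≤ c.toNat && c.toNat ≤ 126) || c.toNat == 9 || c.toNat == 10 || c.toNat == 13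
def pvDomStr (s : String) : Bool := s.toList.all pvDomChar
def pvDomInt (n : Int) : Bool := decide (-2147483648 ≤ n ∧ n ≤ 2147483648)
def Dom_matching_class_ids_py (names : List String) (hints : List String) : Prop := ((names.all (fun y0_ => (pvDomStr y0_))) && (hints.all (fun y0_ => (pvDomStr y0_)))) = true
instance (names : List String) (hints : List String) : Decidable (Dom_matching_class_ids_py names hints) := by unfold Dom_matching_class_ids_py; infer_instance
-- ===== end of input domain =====

-- B replaces A's label-by-label test against the hint set by an inverted index (normalized
-- label / token -> class ids) that is then probed with each normalized hint; same return value.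

-- shared helper: port of _normalize_class_name (on a String argument, 'value or ""' is the identity)
def pvNorm (s : String) : String :=
  PySem.Str.join " " (PySem.Str.split₀ (PySem.Str.replace (PySem.Str.replace (PySem.Str.lower (PySem.Str.strip s)) "_" " ") "-" " "))

-- ===== PORT A =====
def matching_class_ids_py (names : List String) (hints : List String) : List Int :=
  let hintSet : PySem.Set String := PySem.Set.ofList (hints.map pvNorm)
  let matched : List Int :=
    (PySem.List.enumerate names).foldl (fun acc p =>
      let normalized := pvNorm p.2
      if normalized = "" then acc
      else
        let tokens : PySem.Set String := PySem.Set.ofList (PySem.Str.split₀ normalized)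
        if normalized ∈ hintSet ∨ PySem.Set.inter tokens hintSet ≠ [] then acc ++ [p.1]
        else acc) []
  PySem.List.sorted (PySem.Set.ofList matched) (fun x => x) false

-- ===== PORT B =====
def matching_class_ids_py_alt (names : List String) (hints : List String) : List Int :=
  let hintSet : PySem.Set String := PySem.Set.ofList (hints.map pvNorm)
  let index : PySem.Dict String (List Int) :=
    (PySem.List.enumerate names).foldl (fun d p =>
      let normalized := pvNorm p.2
      if normalized = "" then d
      else (normalized :: PySem.Str.split₀ normalized).foldl
            (fun d k => d.modify k [] (· ++ [p.1])) d) PySem.Dict.empty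
  let collected : PySem.Set Int :=
    hintSet.foldl (fun s h => PySem.Set.update s (index.getD h [])) PySem.Set.empty
  PySem.List.sorted collected (fun x => x) false

-- ===== PRECONDITION & SPEC =====
def Spec_matching_class_ids_py (names : List String) (hints : List String) (out : List Int) : Prop := out = matching_class_ids_py_alt names hints
instance (names : List String) (hints : List String) (out : List Int) : Decidable (Spec_matching_class_ids_py names hints out) := by unfold Spec_matching_class_ids_py; infer_instance

-- ===== CLAIM (what is proved, stated in full; the proofs are below) =====
def Claim_equal_matching_class_ids_py : Prop := ∀ (names : List String) (hints : List String), Dom_matching_class_ids_py names hints → Spec_matching_class_ids_py names hints (matching_class_ids_py names hints)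

-- ===== LEMMAS AND PROOFS =====
-- (nf/sp abstract pvNorm / PySem.Str.split₀: keeping them opaque keeps unification cheap)

-- inner loop of B's index build: what ends up in the bucket of key k
lemma pv_mem_getD_modifyFold (j : Int) :
    ∀ (ks : List String) (d : PySem.Dict String (List Int)) (k : String) (i : Int),
      i ∈ (ks.foldl (fun d k => d.modify k [] (· ++ [j])) d).getD k [] ↔
        i ∈ d.getD k [] ∨ (i = j ∧ k ∈ ks) := by
  intro ks
  induction ks with
  | nil => intro d k i; rw [List.foldl_nil]; simp
  | cons k' ks ih =>
    intro d k i
    rw [List.foldl_cons, ih, PySem.Dict.getD_modify, List.mem_cons]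
    by_cases h : k = k'
    · rw [if_pos h]
      subst h
      simp only [List.mem_append, List.mem_singleton]
      tauto
    · rw [if_neg h]
      tauto

-- outer loop of B's index build
lemma pv_mem_getD_indexFold (nf : String → String) (sp : String → List String) :
    ∀ (l : List (Int × String)) (d : PySem.Dict String (List Int)) (k : String) (i : Int),
      i ∈ (l.foldl (fun d p =>
              if nf p.2 = "" then d
              else (nf p.2 :: sp (nf p.2)).foldl
                    (fun d k => d.modify k [] (· ++ [p.1])) d) d).getD k [] ↔
        i ∈ d.getD k [] ∨
          ∃ p ∈ l, nf p.2 ≠ "" ∧ i = p.1 ∧ (k = nf p.2 ∨ k ∈ sp (nf p.2)) := by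
  intro l
  induction l with
  | nil => intro d k i; rw [List.foldl_nil]; simp
  | cons p l ih =>
    intro d k i
    rw [List.foldl_cons]
    by_cases hn : nf p.2 = ""
    · rw [if_pos hn, ih, List.exists_mem_cons_iff]
      simp [hn]
    · rw [if_neg hn, ih, pv_mem_getD_modifyFold, List.exists_mem_cons_iff, List.mem_cons]
      simp only [hn, ne_eq, not_false_eq_true, true_and]
      exact or_assoc

-- B's collection loop over the hint set
lemma pv_mem_foldl_update (g : String → List Int) :
    ∀ (l : List String) (s : PySem.Set Int) (i : Int),
      i ∈ l.foldl (fun s h => PySem.Set.update s (g h)) s ↔ i ∈ s ∨ ∃ h ∈ l, i ∈ g h := by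
  intro l
  induction l with
  | nil => intro s i; rw [List.foldl_nil]; simp
  | cons h l ih =>
    intro s i
    rw [List.foldl_cons, ih, List.exists_mem_cons_iff, PySem.Set.mem_update]
    tauto

lemma pv_nodup_foldl_update (g : String → List Int) :
    ∀ (l : List String) (s : PySem.Set Int), s.Nodup →
      (l.foldl (fun s h => PySem.Set.update s (g h)) s).Nodup := by
  intro l
  induction l with
  | nil => intro s hs; exact hs
  | cons h l ih => intro s hs; exact ih _ (PySem.Set.nodup_update s _ hs)

-- the heart of the equivalence, with the normalizer nf, tokenizer sp and hint set hs abstract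
lemma pv_equiv (nf : String → String) (sp : String → List String) (hs : PySem.Set String)
    (names : List String) :
    PySem.List.sorted (PySem.Set.ofList ((PySem.List.enumerate names).foldl
        (fun acc p =>
          if nf p.2 = "" then acc
          else if nf p.2 ∈ hs ∨ PySem.Set.inter (PySem.Set.ofList (sp (nf p.2))) hs ≠ []
               then acc ++ [p.1] else acc) [])) (fun x => x) =
    PySem.List.sorted (hs.foldl
        (fun s h =>
          PySem.Set.update s (((PySem.List.enumerate names).foldl
            (fun d p =>
              if nf p.2 = "" then d
              else (nf p.2 :: sp (nf p.2)).foldl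
                    (fun d k => d.modify k [] (· ++ [p.1])) d) PySem.Dict.empty).getD h []))
        PySem.Set.empty) (fun x => x) := by
  set Q : Int × String → Bool := fun p =>
    decide (nf p.2 ≠ "") &&
      decide (nf p.2 ∈ hs ∨ PySem.Set.inter (PySem.Set.ofList (sp (nf p.2))) hs ≠ []) with hQ
  have hfun : (fun (acc : List Int) (p : Int × String) =>
        if nf p.2 = "" then acc
        else if nf p.2 ∈ hs ∨ PySem.Set.inter (PySem.Set.ofList (sp (nf p.2))) hs ≠ []
             then acc ++ [p.1] else acc) =
      fun acc p => if Q p then acc ++ [p.1] else acc := by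
    funext acc p
    rw [hQ]
    by_cases h1 : nf p.2 = ""
    · rw [if_pos h1]
      simp [h1]
    · rw [if_neg h1]
      by_cases h2 : nf p.2 ∈ hs ∨ PySem.Set.inter (PySem.Set.ofList (sp (nf p.2))) hs ≠ []
      · rw [if_pos h2]
        simp [h1, h2]
      · rw [if_neg h2]
        simp [h1, h2]
  rw [hfun, PySem.List.foldl_append_if]
  set l := PySem.List.enumerate names with hl
  set matched : List Int := (l.filter Q).map (·.1) with hm
  have hpw : matched.Pairwise (· < ·) := by
    rw [hm]
    exact List.Pairwise.map _ (fun _ _ h => h)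
      (List.Pairwise.filter Q (PySem.List.pairwise_lt_enumerate names 0))
  have hnd : matched.Nodup := hpw.imp (fun h => Int.ne_of_lt h)
  rw [List.nil_append, PySem.Set.ofList_eq_self_of_nodup matched hnd,
    PySem.List.sorted_eq_of_perm_of_pairwise_lt matched matched _ (List.Perm.refl _) hpw]
  -- B's side
  set collected := hs.foldl (fun s h =>
    PySem.Set.update s ((l.foldl
      (fun d p =>
        if nf p.2 = "" then d
        else (nf p.2 :: sp (nf p.2)).foldl
              (fun d k => d.modify k [] (· ++ [p.1])) d) PySem.Dict.empty).getD h []))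
    PySem.Set.empty with hc
  have hndB : collected.Nodup := pv_nodup_foldl_update _ hs PySem.Set.empty List.nodup_nil
  have hmem : ∀ a : Int, a ∈ matched ↔ a ∈ collected := by
    intro a
    rw [hc, pv_mem_foldl_update]
    constructor
    · intro ha
      rw [hm] at ha
      simp only [List.mem_map, List.mem_filter] at ha
      obtain ⟨p, ⟨hp, hQp⟩, rfl⟩ := ha
      rw [hQ] at hQp
      simp only [Bool.and_eq_true, decide_eq_true_eq] at hQp
      obtain ⟨hne, hcond⟩ := hQp
      refine Or.inr ?_
      rcases hcond with hin | hint
      · exact ⟨nf p.2, hin, (pv_mem_getD_indexFold nf sp l PySem.Dict.empty _ _).mpr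
          (Or.inr ⟨p, hp, hne, rfl, Or.inl rfl⟩)⟩
      · obtain ⟨t, ht⟩ := List.exists_mem_of_ne_nil _ hint
        rw [PySem.Set.mem_inter] at ht
        obtain ⟨ht1, ht2⟩ := ht
        rw [PySem.Set.mem_ofList] at ht1
        exact ⟨t, ht2, (pv_mem_getD_indexFold nf sp l PySem.Dict.empty _ _).mpr
          (Or.inr ⟨p, hp, hne, rfl, Or.inr ht1⟩)⟩
    · rintro (he | ⟨h, hh, hin⟩)
      · exact absurd he (List.not_mem_nil)
      · rw [pv_mem_getD_indexFold] at hin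
        rcases hin with he | ⟨p, hp, hne, rfl, hk⟩
        · rw [PySem.Dict.getD_empty] at he
          exact absurd he (List.not_mem_nil)
        · rw [hm]
          simp only [List.mem_map, List.mem_filter]
          refine ⟨p, ⟨hp, ?_⟩, rfl⟩
          rw [hQ]
          simp only [Bool.and_eq_true, decide_eq_true_eq]
          refine ⟨hne, ?_⟩
          rcases hk with rfl | hk
          · exact Or.inl hh
          · refine Or.inr fun hnil => ?_
            have : h ∈ PySem.Set.inter (PySem.Set.ofList (sp (nf p.2))) hs := by
              rw [PySem.Set.mem_inter, PySem.Set.mem_ofList]; exact ⟨hk, hh⟩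
            rw [hnil] at this
            exact List.not_mem_nil this
  have hperm : matched.Perm collected := (List.perm_ext_iff_of_nodup hnd hndB).mpr hmem
  exact (PySem.List.sorted_eq_of_perm_of_pairwise_lt collected matched _ hperm hpw).symm

-- ===== VERDICT (by name: the statement is the Claim_ definition above) =====
theorem matching_class_ids_py_spec : Claim_equal_matching_class_ids_py := by
  intro names hints _dom
  exact pv_equiv pvNorm (fun s => PySem.Str.split₀ s)
    (PySem.Set.ofList (hints.map pvNorm)) names
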